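-- pv_equiv track=rewrite | github.com/benny1232123/Stocks-Master | Frequently-Used-Program/Stock-Selection-Ashare-Theme-Turnover.py | _merge_universe_with_hot_pool
-- ===== SOURCE A (Python) =====
-- def _merge_universe_with_hot_pool(base_universe, hot_pool_universe):
--     merged = []
--     seen = set()
--
--     for item in base_universe or []:
--         code = str(item.get("code", "") or "").strip()
--         if not code or code in seen:
--             continue
--         seen.add(code)
--         merged.append({"code": code, "name": str(item.get("name", "") or "")})
--
--     for item in hot_pool_universe or []:
--         code = str(item.get("code", "") or "").strip()
--         if not code or code in seen:
--             continue
--         seen.add(code)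
--         merged.append({"code": code, "name": str(item.get("name", "") or "")})
--
--     return merged
-- ===== SOURCE B (Python) =====
-- def _merge_universe_with_hot_pool(base_universe, hot_pool_universe):
--     pairs = [(str(it.get("code", "") or "").strip(), str(it.get("name", "") or ""))
--              for it in list(base_universe or []) + list(hot_pool_universe or [])]
--     pairs = [p for p in pairs if p[0]]
--
--     def dedup(ps):
--         if not ps:
--             return []
--         c, n = ps[0]
--         return [{"code": c, "name": n}] + dedup([p for p in ps[1:] if p[0] != c])
--
--     return dedup(pairs)
-- ===== Notes on version B (the rewrite author's own statement) =====
-- stated objective: alternative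
-- what changed: Replaces A's stateful two-loop pass with a seen-set accumulator by a stateless two-stage design: first map the chained inputs to (code, name) pairs and drop empty codes, then deduplicate by structural recursion that keeps the head and filters all later occurrences of its code out of the tail before recursing.
import Mathlib
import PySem

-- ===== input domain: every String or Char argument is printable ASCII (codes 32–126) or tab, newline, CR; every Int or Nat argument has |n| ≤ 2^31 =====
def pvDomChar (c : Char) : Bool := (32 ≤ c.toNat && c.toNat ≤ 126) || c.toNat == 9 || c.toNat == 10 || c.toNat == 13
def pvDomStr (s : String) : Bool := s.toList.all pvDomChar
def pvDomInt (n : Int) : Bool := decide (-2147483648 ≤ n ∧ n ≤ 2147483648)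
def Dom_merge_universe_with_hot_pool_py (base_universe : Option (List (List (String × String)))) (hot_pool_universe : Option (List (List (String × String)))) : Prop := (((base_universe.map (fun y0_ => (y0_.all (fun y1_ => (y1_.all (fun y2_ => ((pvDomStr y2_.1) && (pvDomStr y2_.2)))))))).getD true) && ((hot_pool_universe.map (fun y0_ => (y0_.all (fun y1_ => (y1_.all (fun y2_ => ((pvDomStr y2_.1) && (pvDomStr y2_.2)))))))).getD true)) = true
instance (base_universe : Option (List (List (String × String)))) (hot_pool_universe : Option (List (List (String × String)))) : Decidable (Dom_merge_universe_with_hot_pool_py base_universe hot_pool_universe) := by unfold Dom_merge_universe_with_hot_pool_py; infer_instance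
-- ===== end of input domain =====

-- B replaces A's stateful seen-set loop with a recursive head-keep / filter-the-tail
-- dedup over precomputed (code, name) pairs; objective: alternative (no state, O(n^2)).

-- shared extraction (identical expression in both Pythons): str(item.get(k, "") or "").strip() / str(... or "")
def pvCode (item : List (String × String)) : String :=
  PySem.Str.strip ((PySem.Dict.ofList item).getD "code" "")

def pvName (item : List (String × String)) : String :=
  (PySem.Dict.ofList item).getD "name" ""

-- ===== PORT A =====
def mergeStepA (st : List (List (String × String)) × PySem.Set String)
    (item : List (String × String)) : List (List (String × String)) × PySem.Set String :=
  let code := pvCode item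
  if code = "" ∨ code ∈ st.2 then st
  else (st.1 ++ [[("code", code), ("name", pvName item)]], st.2.add code)

def merge_universe_with_hot_pool_py (base_universe : Option (List (List (String × String)))) (hot_pool_universe : Option (List (List (String × String)))) : List (List (String × String)) :=
  let st1 := (base_universe.getD []).foldl mergeStepA ([], PySem.Set.empty)
  let st2 := (hot_pool_universe.getD []).foldl mergeStepA st1
  st2.1

-- ===== PORT B =====
def pvPair (item : List (String × String)) : String × String := (pvCode item, pvName item)

def pvRow (p : String × String) : List (String × String) := [("code", p.1), ("name", p.2)]

-- dedup(ps): keep the head, recurse on the tail with the head's code filtered out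
def recDedup : List (String × String) → List (List (String × String))
  | [] => []
  | p :: rest => pvRow p :: recDedup (rest.filter (fun q => decide (q.1 ≠ p.1)))
termination_by l => l.length
decreasing_by
  simp only [List.length_cons, List.length_unattach]
  exact Nat.lt_succ_of_le ((List.length_filter_le _ _).trans (by simp))

def merge_universe_with_hot_pool_py_alt (base_universe : Option (List (List (String × String)))) (hot_pool_universe : Option (List (List (String × String)))) : List (List (String × String)) :=
  let pairs := (((base_universe.getD []) ++ (hot_pool_universe.getD [])).map pvPair).filter
    (fun p => decide (p.1 ≠ ""))
  recDedup pairs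

-- ===== PRECONDITION & SPEC =====
def Spec_merge_universe_with_hot_pool_py (base_universe : Option (List (List (String × String)))) (hot_pool_universe : Option (List (List (String × String)))) (out : List (List (String × String))) : Prop := out = merge_universe_with_hot_pool_py_alt base_universe hot_pool_universe
instance (base_universe : Option (List (List (String × String)))) (hot_pool_universe : Option (List (List (String × String)))) (out : List (List (String × String))) : Decidable (Spec_merge_universe_with_hot_pool_py base_universe hot_pool_universe out) := by unfold Spec_merge_universe_with_hot_pool_py; infer_instance

-- ===== CLAIM (what is proved, stated in full; the proofs are below) =====
def Claim_equal_merge_universe_with_hot_pool_py : Prop := ∀ (base_universe : Option (List (List (String × String)))) (hot_pool_universe : Option (List (List (String × String)))), Dom_merge_universe_with_hot_pool_py base_universe hot_pool_universe → Spec_merge_universe_with_hot_pool_py base_universe hot_pool_universe (merge_universe_with_hot_pool_py base_universe hot_pool_universe)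

-- ===== LEMMAS AND PROOFS =====

lemma recDedup_nil : recDedup [] = [] := by rw [recDedup]

lemma recDedup_cons (p : String × String) (l : List (String × String)) :
    recDedup (p :: l) = pvRow p :: recDedup (l.filter (fun q => decide (q.1 ≠ p.1))) := by
  rw [recDedup]

-- Invariant: A's loop from state (m, S) produces m ++ recDedup of the remaining
-- pairs whose code is nonempty and not yet in S.
lemma merge_loop_inv (l : List (List (String × String)))
    (m : List (List (String × String))) (S : PySem.Set String) :
    (l.foldl mergeStepA (m, S)).1 =
      m ++ recDedup ((l.map pvPair).filter
        (fun p => decide (p.1 ≠ "") && decide (p.1 ∉ S))) := by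
  induction l generalizing m S with
  | nil =>
    simp [recDedup_nil]
  | cons item rest ih =>
    simp only [List.foldl_cons, List.map_cons, List.filter_cons]
    by_cases h : pvCode item = "" ∨ pvCode item ∈ S
    · have hst : mergeStepA (m, S) item = (m, S) := by simp [mergeStepA, h]
      have hcond : (decide ((pvPair item).1 ≠ "") && decide ((pvPair item).1 ∉ S)) = false := by
        rcases h with h | h <;> simp [pvPair, h]
      rw [hst, hcond, ih]
      simp
    · rw [not_or] at h
      obtain ⟨hc, hns⟩ := h
      have hst : mergeStepA (m, S) item =
          (m ++ [pvRow (pvPair item)], S.add (pvCode item)) := by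
        simp [mergeStepA, hc, hns, pvRow, pvPair]
      have hcond : (decide ((pvPair item).1 ≠ "") && decide ((pvPair item).1 ∉ S)) = true := by
        simp [pvPair, hc, hns]
      rw [hst, hcond, if_pos rfl, ih, recDedup_cons]
      have hfil : (List.map pvPair rest).filter
            (fun p => decide (p.1 ≠ "") && decide (p.1 ∉ S.add (pvCode item))) =
          ((List.map pvPair rest).filter
            (fun p => decide (p.1 ≠ "") && decide (p.1 ∉ S))).filter
            (fun q => decide (q.1 ≠ (pvPair item).1)) := by
        rw [List.filter_filter]
        apply List.filter_congr
        intro p _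
        have hmem : p.1 ∈ S.add (pvCode item) ↔ p.1 ∈ S ∨ p.1 = pvCode item :=
          PySem.Set.mem_add S (pvCode item) p.1
        simp only [pvPair]
        by_cases h1 : p.1 = "" <;> by_cases h2 : p.1 ∈ S <;>
          by_cases h3 : p.1 = pvCode item <;>
          simp [h1, h2, h3, hmem]
      rw [hfil]
      simp

-- ===== VERDICT (by name: the statement is the Claim_ definition above) =====
theorem merge_universe_with_hot_pool_py_spec : Claim_equal_merge_universe_with_hot_pool_py := by
  intro base hot _
  unfold Spec_merge_universe_with_hot_pool_py
  show ((hot.getD []).foldl mergeStepA ((base.getD []).foldl mergeStepA ([], PySem.Set.empty))).1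
      = recDedup ((((base.getD []) ++ (hot.getD [])).map pvPair).filter (fun p => decide (p.1 ≠ "")))
  rw [← List.foldl_append, merge_loop_inv]
  simp
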